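-- pv_equiv track=rewrite | github.com/PremPatel8/Competitive_Coding | HackerRank/HackerRank Poisonous Plants.py | poisonousPlants
-- ===== SOURCE A (Python) =====
-- def poisonousPlants(p):
--     cntr = 0
--
--     while True:
--         del_list = []
--
--         for i in range(1,len(p)):
--             if p[i] > p[i-1]:
--                 del_list.append(i)
--         if not del_list:
--             return cntr
--         else:
--             cntr += 1
--             for index in sorted(del_list, reverse=True):
--                 del p[index]
-- ===== SOURCE B (Python) =====
-- def poisonousPlants(p):
--     # Monotonic stack of (value, death_day) pairs; answer = max death day.
--     stack = []
--     best = 0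
--     for x in p:
--         day = 0
--         while stack and stack[-1][0] >= x:
--             day = max(day, stack.pop()[1])
--         day = day + 1 if stack else 0
--         stack.append((x, day))
--         best = max(best, day)
--     return best
-- ===== Notes on version B (the rewrite author's own statement) =====
-- stated objective: faster
-- what changed: Replaced the repeated delete-a-round-and-rescan simulation by a single left-to-right pass with a monotonic stack that computes each plant's death day directly; the answer is the maximum death day.
import Mathlib
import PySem

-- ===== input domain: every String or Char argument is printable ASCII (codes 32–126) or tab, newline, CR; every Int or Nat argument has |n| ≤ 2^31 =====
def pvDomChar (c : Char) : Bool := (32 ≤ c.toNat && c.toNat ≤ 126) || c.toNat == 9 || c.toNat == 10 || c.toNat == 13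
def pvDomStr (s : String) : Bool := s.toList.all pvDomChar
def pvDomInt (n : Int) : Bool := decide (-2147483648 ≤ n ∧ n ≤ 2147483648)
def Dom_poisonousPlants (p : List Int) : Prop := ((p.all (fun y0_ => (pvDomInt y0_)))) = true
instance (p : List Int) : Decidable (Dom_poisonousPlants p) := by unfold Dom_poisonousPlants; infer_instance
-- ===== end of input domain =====

-- B replaces A's repeated delete-and-rescan rounds by one monotonic-stack pass computing each
-- plant's death day (objective: faster, asymptotic). Note: Python A mutates its argument list
-- in place (del); the equivalence proved here is about the RETURN value only.

-- ===== PORT A =====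

-- del_list of one round: indices i in range(1, len(p)) with p[i] > p[i-1].
-- (pyGetD with default 0 is exact here: every index range(1,len) produces is in range.)
def pvDelList (p : List Int) : List Int :=
  (PySem.List.pyRange 1 p.length 1).foldl
    (fun acc i =>
      if PySem.List.pyGetD p (i - 1) 0 < PySem.List.pyGetD p i 0 then acc ++ [i] else acc) []

-- `del p[index]` (index always valid here, so the `none` branch is unreachable)
def pvDelAt (l : List Int) (index : Int) : List Int :=
  match PySem.List.pop? l index with
  | some r => r.2
  | none => l

-- one round of deletions: `for index in sorted(del_list, reverse=True): del p[index]`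
def pvDelRound (p : List Int) : List Int :=
  (PySem.List.sorted (pvDelList p) (fun x => x) true).foldl pvDelAt p

-- lemmas the port needs for termination (cited in decreasing_by)
lemma pvDelList_mem_bounds (p : List Int) (j : Int) (hj : j ∈ pvDelList p) :
    1 ≤ j ∧ j < p.length := by
  unfold pvDelList at hj
  rw [PySem.List.foldl_append_ite_eq_filter] at hj
  simp only [List.nil_append, List.mem_filter] at hj
  exact PySem.List.mem_pyRange_one.mp hj.1

lemma pvDelAt_length_le (l : List Int) (i : Int) : (pvDelAt l i).length ≤ l.length := by
  unfold pvDelAt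
  cases h : PySem.List.pop? l i with
  | none => exact le_refl _
  | some r =>
    show r.2.length ≤ l.length
    have := PySem.List.length_of_pop?_eq_some l h
    omega

lemma foldl_pvDelAt_length_le (is : List Int) (l : List Int) :
    (is.foldl pvDelAt l).length ≤ l.length := by
  induction is generalizing l with
  | nil => exact le_refl _
  | cons i is ih => exact le_trans (ih (pvDelAt l i)) (pvDelAt_length_le l i)

lemma pvDelRound_length_lt (p : List Int) (h : pvDelList p ≠ []) :
    (pvDelRound p).length < p.length := by
  unfold pvDelRound
  cases hs : PySem.List.sorted (pvDelList p) (fun x => x) true with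
  | nil => exact absurd ((PySem.List.sorted_eq_nil_iff _ _ _).mp hs) h
  | cons j rest =>
    have hjm : j ∈ pvDelList p := by
      have : j ∈ PySem.List.sorted (pvDelList p) (fun x => x) true := by
        rw [hs]; exact List.mem_cons_self
      exact (PySem.List.mem_sorted _ _ _ _).mp this
    obtain ⟨hj1, hj2⟩ := pvDelList_mem_bounds p j hjm
    have hjn : j = ((j.toNat : Nat) : Int) := by omega
    have hlt : j.toNat < p.length := by omega
    have hpop : PySem.List.pop? p j = some (p[j.toNat], p.eraseIdx j.toNat) := by
      have h0 := PySem.List.pop?_natCast p j.toNat hlt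
      rw [← hjn] at h0
      exact h0
    have h1 : pvDelAt p j = p.eraseIdx j.toNat := by unfold pvDelAt; rw [hpop]
    have h2 : (p.eraseIdx j.toNat).length = p.length - 1 := List.length_eraseIdx_of_lt hlt
    calc ((j :: rest).foldl pvDelAt p).length
        = (rest.foldl pvDelAt (pvDelAt p j)).length := rfl
      _ ≤ (pvDelAt p j).length := foldl_pvDelAt_length_le rest _
      _ < p.length := by rw [h1, h2]; omega

-- the `while True` loop, with cntr
def poisonousPlantsAux (p : List Int) (cntr : Int) : Int :=
  if h : pvDelList p = [] then cntr
  else poisonousPlantsAux (pvDelRound p) (cntr + 1)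
termination_by p.length
decreasing_by exact pvDelRound_length_lt p h

def poisonousPlants (p : List Int) : Int := poisonousPlantsAux p 0

-- ===== PORT B =====

-- `while stack and stack[-1][0] >= x: day = max(day, stack.pop()[1])`  (head of the list = top)
def pvPop (x : Int) : List (Int × Int) → List (Int × Int) × Int
  | [] => ([], 0)
  | (v, d) :: st => if x ≤ v then
      let r := pvPop x st
      (r.1, max r.2 d)
    else ((v, d) :: st, 0)

-- one iteration of B's for-loop on the state (stack, best)
def pvStep (s : List (Int × Int) × Int) (x : Int) : List (Int × Int) × Int :=
  let r := pvPop x s.1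
  let day := if r.1.isEmpty then 0 else r.2 + 1
  ((x, day) :: r.1, max s.2 day)

def poisonousPlants_alt (p : List Int) : Int := (p.foldl pvStep ([], 0)).2

-- ===== PRECONDITION & SPEC =====
def Spec_poisonousPlants (p : List Int) (out : Int) : Prop := out = poisonousPlants_alt p
instance (p : List Int) (out : Int) : Decidable (Spec_poisonousPlants p out) := by unfold Spec_poisonousPlants; infer_instance

-- ===== CLAIM (what is proved, stated in full; the proofs are below) =====
def Claim_equal_poisonousPlants : Prop := ∀ (p : List Int), Dom_poisonousPlants p → Spec_poisonousPlants p (poisonousPlants p)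

-- ===== LEMMAS AND PROOFS =====

-- survivors of one round among xs, where prev is the plant's left neighbour in the ORIGINAL row
def pvSurv (prev : Int) : List Int → List Int
  | [] => []
  | x :: xs => if prev < x then pvSurv x xs else x :: pvSurv x xs

-- run B's loop from an arbitrary stack; returns (final stack, max day assigned on this segment)
def pvRun (S : List (Int × Int)) : List Int → List (Int × Int) × Int
  | [] => (S, 0)
  | x :: xs =>
    let s := pvStep (S, 0) x
    let t := pvRun s.1 xs
    (t.1, max s.2 t.2)

-- "one round passes": drop stack entries that die this round (day 1), decrement the rest
def pvDecF : List (Int × Int) → List (Int × Int)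
  | [] => []
  | (v, d) :: S => if d = 1 then pvDecF S else (v, max (d - 1) 0) :: pvDecF S

-- stack invariant: nonempty, values strictly decreasing from the head (= top),
-- day 0 exactly at the bottom, day ≥ 1 elsewhere
def pvInv : List (Int × Int) → Prop
  | [] => False
  | (_, d) :: [] => d = 0
  | (v, d) :: b :: S => 1 ≤ d ∧ b.1 < v ∧ pvInv (b :: S)

-- nonincreasing row: nothing dies
def pvNonInc : List Int → Prop
  | [] => True
  | _ :: [] => True
  | a :: b :: u => b ≤ a ∧ pvNonInc (b :: u)

-- head of L (if any) is < x
def pvHeadLt (x : Int) : List (Int × Int) → Prop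
  | [] => True
  | b :: _ => b.1 < x

-- "A = B outside the stack" glue: the core value B computes
def pvCore : List Int → Int
  | [] => 0
  | a :: q => (pvRun [(a, 0)] q).2

lemma pvPop_snd_nonneg (x : Int) (S : List (Int × Int)) : 0 ≤ (pvPop x S).2 := by
  induction S with
  | nil => simp [pvPop]
  | cons b S ih =>
    obtain ⟨v, d⟩ := b
    simp only [pvPop]
    split
    · simp only []
      have := ih
      omega
    · simp

lemma pvRun_snd_nonneg (xs : List Int) (S : List (Int × Int)) : 0 ≤ (pvRun S xs).2 := by
  induction xs generalizing S with
  | nil => simp [pvRun]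
  | cons x xs ih =>
    simp only [pvRun, pvStep]
    have := ih ((x, if (pvPop x S).1.isEmpty then 0 else (pvPop x S).2 + 1) :: (pvPop x S).1)
    simp only [le_max_iff]
    right; exact this

lemma pvInv_head_lt (T : List (Int × Int)) (v : Int) (dv : Int)
    (h : pvInv ((v, dv) :: T)) : ∀ b ∈ T, b.1 < v := by
  induction T generalizing v dv with
  | nil => simp
  | cons c T ih =>
    intro b hb
    obtain ⟨_, hc, hT⟩ := h
    rcases List.mem_cons.mp hb with h1 | h2
    · rw [h1]; exact hc
    · exact lt_trans (ih c.1 c.2 (by simpa using hT) b h2) hc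

lemma pvDecF_mem (S : List (Int × Int)) (b : Int × Int) (h : b ∈ pvDecF S) :
    ∃ d, (b.1, d) ∈ S := by
  induction S with
  | nil => simp [pvDecF] at h
  | cons c S ih =>
    obtain ⟨v, d⟩ := c
    simp only [pvDecF] at h
    split at h
    · obtain ⟨e, he⟩ := ih h; exact ⟨e, by simp [he]⟩
    · rcases List.mem_cons.mp h with h1 | h2
      · exact ⟨d, by simp [h1]⟩
      · obtain ⟨e, he⟩ := ih h2; exact ⟨e, by simp [he]⟩

lemma pvDecF_ne_nil (S : List (Int × Int)) (h : pvInv S) : pvDecF S ≠ [] := by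
  induction S with
  | nil => exact absurd h (by simp [pvInv])
  | cons c S ih =>
    obtain ⟨v, d⟩ := c
    cases S with
    | nil => have : d = 0 := h; simp [pvDecF, this]
    | cons b S =>
      obtain ⟨hd, hb, hS⟩ := h
      simp only [pvDecF]
      split
      · exact ih hS
      · simp

lemma pvPop_all_lt (x : Int) (L : List (Int × Int)) (h : ∀ b ∈ L, b.1 < x) :
    pvPop x L = (L, 0) := by
  cases L with
  | nil => rfl
  | cons b L =>
    obtain ⟨v, d⟩ := b
    have : v < x := h (v, d) (by simp)
    simp [pvPop, not_le.mpr this]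

lemma pvPop_cons (x v d : Int) (L : List (Int × Int)) :
    pvPop x ((v, d) :: L)
      = if x ≤ v then ((pvPop x L).1, max (pvPop x L).2 d) else ((v, d) :: L, 0) := rfl

lemma pvPop_key (x : Int) (T : List (Int × Int)) (v dv : Int) (st : List (Int × Int)) (m : Int)
    (hInv : pvInv ((v, dv) :: T)) (hx : x ≤ v) (hr : pvPop x ((v, dv) :: T) = (st, m)) :
    (st = [] → (pvPop x (pvDecF ((v, dv) :: T))).1 = []) ∧
    (st ≠ [] → pvPop x (pvDecF ((v, dv) :: T)) = (pvDecF st, max (m - 1) 0)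
       ∧ 1 ≤ m ∧ pvHeadLt x st ∧ pvInv st) := by
  induction T generalizing v dv st m with
  | nil =>
    have hdv : dv = 0 := hInv
    rw [pvPop_cons, if_pos hx] at hr
    have hst : st = [] := (congrArg Prod.fst hr).symm
    constructor
    · intro _
      simp only [pvDecF, hdv]
      norm_num
      simp [pvPop, hx]
    · intro hne
      exact absurd hst hne
  | cons b T ih =>
    obtain ⟨c, e⟩ := b
    obtain ⟨hdv, hcv, hinvT⟩ := hInv
    rw [pvPop_cons, if_pos hx] at hr
    rcases hq : pvPop x ((c, e) :: T) with ⟨q1, q2⟩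
    rw [hq] at hr
    have hst : st = q1 := (congrArg Prod.fst hr).symm
    have hm : m = max q2 dv := (congrArg Prod.snd hr).symm
    subst hst; subst hm
    by_cases hxc : x ≤ c
    · have IH := ih c e st q2 hinvT hxc hq
      by_cases hdv1 : dv = 1
      · have hdec : pvDecF ((v, dv) :: (c, e) :: T) = pvDecF ((c, e) :: T) := by
          simp [pvDecF, hdv1]
        constructor
        · intro h0
          rw [hdec]
          exact IH.1 h0
        · intro hne
          obtain ⟨hE, hq2, hH, hI⟩ := IH.2 hne
          rw [hdec, hE]
          exact ⟨by rw [show max (max q2 dv - 1) 0 = max (q2 - 1) 0 by omega], by omega, hH, hI⟩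
      · have hdec : pvDecF ((v, dv) :: (c, e) :: T)
            = (v, max (dv - 1) 0) :: pvDecF ((c, e) :: T) := by
          simp [pvDecF, hdv1]
        constructor
        · intro h0
          rw [hdec, pvPop_cons, if_pos hx]
          have h1 := IH.1 h0
          rcases hq' : pvPop x (pvDecF ((c, e) :: T)) with ⟨r1, r2⟩
          rw [hq'] at h1
          simpa using h1
        · intro hne
          obtain ⟨hE, hq2, hH, hI⟩ := IH.2 hne
          rw [hdec, pvPop_cons, if_pos hx, hE]
          refine ⟨?_, by omega, hH, hI⟩
          rw [show max (max (q2 - 1) 0) (max (dv - 1) 0) = max (max q2 dv - 1) 0 by omega]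
    · have hq' : pvPop x ((c, e) :: T) = ((c, e) :: T, 0) := by
        simp [pvPop, hxc]
      rw [hq'] at hq
      have hstv : st = (c, e) :: T := (congrArg Prod.fst hq).symm
      have hq20 : q2 = 0 := (congrArg Prod.snd hq).symm
      subst hq20; subst hstv
      have hall : ∀ bb ∈ pvDecF ((c, e) :: T), bb.1 < x := by
        intro bb hbb
        obtain ⟨d, hd⟩ := pvDecF_mem _ bb hbb
        rcases List.mem_cons.mp hd with h1 | h2
        · have : bb.1 = c := congrArg Prod.fst h1
          omega
        · have := pvInv_head_lt T c e hinvT (bb.1, d) h2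
          simp at this
          omega
      have hid := pvPop_all_lt x (pvDecF ((c, e) :: T)) hall
      refine ⟨fun h0 => absurd h0 (by simp), fun _ => ?_⟩
      by_cases hdv1 : dv = 1
      · have hdec : pvDecF ((v, dv) :: (c, e) :: T) = pvDecF ((c, e) :: T) := by
          simp [pvDecF, hdv1]
        rw [hdec, hid]
        exact ⟨by rw [show max (max 0 dv - 1) 0 = (0 : Int) by omega], by omega, not_le.mp hxc, hinvT⟩
      · have hdec : pvDecF ((v, dv) :: (c, e) :: T)
            = (v, max (dv - 1) 0) :: pvDecF ((c, e) :: T) := by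
          simp [pvDecF, hdv1]
        rw [hdec, pvPop_cons, if_pos hx, hid]
        exact ⟨by rw [show max (0 : Int) (max (dv - 1) 0) = max (max 0 dv - 1) 0 by omega], by omega, not_le.mp hxc, hinvT⟩

lemma pvStep_eq (S : List (Int × Int)) (b x : Int) :
    pvStep (S, b) x
      = ((x, if (pvPop x S).1.isEmpty then 0 else (pvPop x S).2 + 1) :: (pvPop x S).1,
         max b (if (pvPop x S).1.isEmpty then 0 else (pvPop x S).2 + 1)) := rfl

lemma pvRun_cons (S : List (Int × Int)) (x : Int) (xs : List Int) :
    pvRun S (x :: xs)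
      = ((pvRun (pvStep (S, 0) x).1 xs).1,
         max (pvStep (S, 0) x).2 (pvRun (pvStep (S, 0) x).1 xs).2) := rfl

-- one loop iteration, explicitly, in the two cases
lemma pvIteEmptyNil {α : Type} (a b : Int) :
    (if ([] : List α).isEmpty then a else b) = a := rfl

lemma pvIteEmptyCons {α : Type} (z : α) (zs : List α) (a b : Int) :
    (if (z :: zs).isEmpty then a else b) = b := rfl

lemma pvStep_die (x v dv : Int) (T : List (Int × Int)) (hx : v < x) (b : Int) :
    pvStep ((v, dv) :: T, b) x = ((x, 1) :: (v, dv) :: T, max b 1) := by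
  have h1 : pvPop x ((v, dv) :: T) = ((v, dv) :: T, 0) := by
    rw [pvPop_cons, if_neg (not_le.mpr hx)]
  rw [pvStep_eq, h1, pvIteEmptyCons]
  norm_num

lemma pvStep_pop (x v dv : Int) (T : List (Int × Int)) (st : List (Int × Int)) (m : Int)
    (hr : pvPop x ((v, dv) :: T) = (st, m)) (b : Int) :
    pvStep ((v, dv) :: T, b) x
      = ((x, if st.isEmpty then 0 else m + 1) :: st, max b (if st.isEmpty then 0 else m + 1)) := by
  rw [pvStep_eq, hr]

-- MAIN LEMMA: one simulation round commutes with the stack computation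
lemma pvRun_round (xs : List Int) (v dv : Int) (T : List (Int × Int))
    (hInv : pvInv ((v, dv) :: T)) :
    pvRun (pvDecF ((v, dv) :: T)) (pvSurv v xs)
      = (pvDecF (pvRun ((v, dv) :: T) xs).1, max ((pvRun ((v, dv) :: T) xs).2 - 1) 0) := by
  induction xs generalizing v dv T with
  | nil =>
    show (pvDecF ((v, dv) :: T), 0) = (pvDecF ((v, dv) :: T), max (0 - 1) 0)
    norm_num
  | cons x xs ih =>
    by_cases hxv : v < x
    · -- x dies this round (day 1)
      have hsx : pvSurv v (x :: xs) = pvSurv x xs := by simp [pvSurv, hxv]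
      have hInv' : pvInv ((x, 1) :: (v, dv) :: T) := ⟨le_refl _, hxv, hInv⟩
      have hdec1 : pvDecF ((x, 1) :: (v, dv) :: T) = pvDecF ((v, dv) :: T) := by
        simp [pvDecF]
      have IH := ih x 1 ((v, dv) :: T) hInv'
      rw [hdec1] at IH
      rw [hsx, pvRun_cons, pvStep_die x v dv T hxv 0, IH]
      have ht := pvRun_snd_nonneg xs ((x, 1) :: (v, dv) :: T)
      rw [Prod.mk.injEq]
      refine ⟨rfl, by simp only [max_def]; split_ifs <;> omega⟩
    · -- x survives
      have hx : x ≤ v := by omega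
      have hsx : pvSurv v (x :: xs) = x :: pvSurv x xs := by simp [pvSurv, hxv]
      rcases hr : pvPop x ((v, dv) :: T) with ⟨st, m⟩
      have key := pvPop_key x T v dv st m hInv hx hr
      cases st with
      | nil =>
        have hE := key.1 rfl
        rcases hE2 : pvPop x (pvDecF ((v, dv) :: T)) with ⟨st', m'⟩
        rw [hE2] at hE
        simp only at hE
        subst hE
        have hold : pvStep ((v, dv) :: T, 0) x = ([(x, 0)], 0) := by
          rw [pvStep_pop x v dv T [] m hr 0, pvIteEmptyNil]
          norm_num
        have hnew : pvStep (pvDecF ((v, dv) :: T), 0) x = ([(x, 0)], 0) := by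
          rw [pvStep_eq, hE2]
          show ((x, if ([] : List (Int × Int)).isEmpty then 0 else m' + 1) :: [],
              max 0 (if ([] : List (Int × Int)).isEmpty then 0 else m' + 1)) = _
          rw [pvIteEmptyNil]
          norm_num
        have hInvN : pvInv [((x : Int), (0 : Int))] := rfl
        have IH := ih x 0 [] hInvN
        have hdecN : pvDecF [((x : Int), (0 : Int))] = [(x, 0)] := by
          simp [pvDecF]
        rw [hdecN] at IH
        rw [hsx, pvRun_cons, pvRun_cons, hold, hnew, IH]
        have ht := pvRun_snd_nonneg xs [((x : Int), (0 : Int))]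
        rw [Prod.mk.injEq]
        refine ⟨rfl, by simp only [max_def]; split_ifs <;> omega⟩
      | cons bb st0 =>
        obtain ⟨hE, hm1, hH, hI⟩ := key.2 (by simp)
        have hdecst := pvDecF_ne_nil (bb :: st0) hI
        have hold : pvStep ((v, dv) :: T, 0) x = ((x, m + 1) :: bb :: st0, m + 1) := by
          rw [pvStep_pop x v dv T (bb :: st0) m hr 0, pvIteEmptyCons]
          rw [show max (0 : Int) (m + 1) = m + 1 by omega]
        have hnew : pvStep (pvDecF ((v, dv) :: T), 0) x
            = ((x, m) :: pvDecF (bb :: st0), m) := by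
          rw [pvStep_eq, hE]
          rcases hzz : pvDecF (bb :: st0) with _ | ⟨z, zs⟩
          · exact absurd hzz hdecst
          · show ((x, if (z :: zs).isEmpty then 0 else max (m - 1) 0 + 1) :: z :: zs,
                max 0 (if (z :: zs).isEmpty then 0 else max (m - 1) 0 + 1)) = _
            rw [pvIteEmptyCons]
            rw [show max (m - 1) 0 + 1 = m by omega, show max (0 : Int) m = m by omega]
        obtain ⟨bv, bd⟩ := bb
        have hInvN : pvInv ((x, m + 1) :: (bv, bd) :: st0) := ⟨by omega, hH, hI⟩
        have IH := ih x (m + 1) ((bv, bd) :: st0) hInvN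
        have hdecN : pvDecF ((x, m + 1) :: (bv, bd) :: st0)
            = (x, m) :: pvDecF ((bv, bd) :: st0) := by
          have h1 : ¬ (m + 1 = 1) := by omega
          simp only [pvDecF, if_neg h1]
          have : max (m + 1 - 1) 0 = m := by omega
          rw [this]
        rw [hdecN] at IH
        rw [hsx, pvRun_cons, pvRun_cons, hold, hnew, IH]
        have ht := pvRun_snd_nonneg xs ((x, m + 1) :: (bv, bd) :: st0)
        rw [Prod.mk.injEq]
        refine ⟨rfl, by simp only [max_def]; split_ifs <;> omega⟩

lemma pvRun_nonInc (xs : List Int) (v : Int) (h : pvNonInc (v :: xs)) :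
    ∃ w, pvRun [(v, 0)] xs = ([(w, 0)], 0) := by
  induction xs generalizing v with
  | nil => exact ⟨v, rfl⟩
  | cons x xs ih =>
    obtain ⟨hx, h'⟩ := h
    have hpop : pvPop x [(v, 0)] = ([], 0) := by simp [pvPop, hx]
    obtain ⟨w, hw⟩ := ih x h'
    refine ⟨w, ?_⟩
    simp only [pvRun, pvStep, hpop]
    simp [hw]

lemma pvRun_pos (xs : List Int) (v dv : Int) (T : List (Int × Int))
    (hInv : pvInv ((v, dv) :: T)) (h : ¬ pvNonInc (v :: xs)) :
    1 ≤ (pvRun ((v, dv) :: T) xs).2 := by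
  induction xs generalizing v dv T with
  | nil => exact absurd trivial h
  | cons x xs ih =>
    by_cases hx : x ≤ v
    · have h' : ¬ pvNonInc (x :: xs) := fun hc => h ⟨hx, hc⟩
      rcases hr : pvPop x ((v, dv) :: T) with ⟨st, m⟩
      have key := pvPop_key x T v dv st m hInv hx hr
      cases st with
      | nil =>
        have IH := ih x 0 [] rfl h'
        rw [pvRun_cons, pvStep_pop x v dv T [] m hr 0, pvIteEmptyNil]
        exact le_trans IH (le_max_right _ _)
      | cons bb st0 =>
        obtain ⟨hE, hm1, hH, hI⟩ := key.2 (by simp)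
        obtain ⟨bv, bd⟩ := bb
        have hInvN : pvInv ((x, m + 1) :: (bv, bd) :: st0) := ⟨by omega, hH, hI⟩
        have IH := ih x (m + 1) ((bv, bd) :: st0) hInvN h'
        rw [pvRun_cons, pvStep_pop x v dv T ((bv, bd) :: st0) m hr 0, pvIteEmptyCons]
        exact le_trans IH (le_max_right _ _)
    · rw [pvRun_cons, pvStep_die x v dv T (by omega) 0]
      have ht := pvRun_snd_nonneg xs ((x, 1) :: (v, dv) :: T)
      simp only [max_def]
      split_ifs <;> omega

lemma pvDelList_nil : pvDelList [] = [] := by decide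

lemma pvDelList_single (a : Int) : pvDelList [a] = [] := by
  unfold pvDelList
  rw [PySem.List.pyRange_one_eq_nil (by simp)]
  rfl

lemma pvDelList_filter (p : List Int) :
    pvDelList p = (PySem.List.pyRange 1 p.length 1).filter
      (fun i => decide (PySem.List.pyGetD p (i - 1) 0 < PySem.List.pyGetD p i 0)) := by
  unfold pvDelList
  rw [PySem.List.foldl_append_ite_eq_filter]
  simp only [List.nil_append]

lemma pvGetD_cons_succ (a : Int) (q : List Int) (i : Int) (h0 : 0 ≤ i) (h1 : i < q.length) :
    PySem.List.pyGetD (a :: q) (i + 1) 0 = PySem.List.pyGetD q i 0 := by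
  rw [PySem.List.pyGetD_eq_getElem _ _ (by omega) (by simp; omega),
      PySem.List.pyGetD_eq_getElem _ _ h0 (by omega)]
  simp [show (i + 1).toNat = i.toNat + 1 by omega]

lemma pvDelList_cons (a b : Int) (u : List Int) :
    pvDelList (a :: b :: u) = (if a < b then [(1 : Int)] else []) ++ (pvDelList (b :: u)).map (· + 1) := by
  rw [pvDelList_filter, pvDelList_filter]
  have h1 : PySem.List.pyRange 1 ((a :: b :: u).length) 1
      = 1 :: PySem.List.pyRange 2 ((a :: b :: u).length) 1 := by
    have := PySem.List.pyRange_one_cons (a := 1) (b := ((a :: b :: u).length : Int)) (by simp)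
    simpa using this
  have h2 : PySem.List.pyRange 2 ((a :: b :: u).length) 1
      = (PySem.List.pyRange 1 ((b :: u).length) 1).map (· + 1) := by
    rw [PySem.List.pyRange_one, PySem.List.pyRange_one, List.map_map]
    have hn : (((a :: b :: u).length : Int) - 2).toNat = (((b :: u).length : Int) - 1).toNat := by
      simp; omega
    rw [hn]
    apply List.map_congr_left
    intro k _
    simp only [Function.comp]
    omega
  rw [h1, h2, List.filter_cons]
  have hhead : (decide (PySem.List.pyGetD (a :: b :: u) (1 - 1) 0
      < PySem.List.pyGetD (a :: b :: u) 1 0)) = decide (a < b) := by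
    norm_num
    rw [PySem.List.pyGetD_eq_getElem _ _ (by norm_num) (by simp)]
    simp
  rw [hhead, List.filter_map]
  have hcong : List.filter ((fun i => decide (PySem.List.pyGetD (a :: b :: u) (i - 1) 0
          < PySem.List.pyGetD (a :: b :: u) i 0)) ∘ (· + 1)) (PySem.List.pyRange 1 ((b :: u).length) 1)
      = List.filter (fun i => decide (PySem.List.pyGetD (b :: u) (i - 1) 0
          < PySem.List.pyGetD (b :: u) i 0)) (PySem.List.pyRange 1 ((b :: u).length) 1) := by
    apply List.filter_congr
    intro i hi
    obtain ⟨hi1, hi2⟩ := PySem.List.mem_pyRange_one.mp hi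
    simp only [Function.comp]
    rw [show i + 1 - 1 = i by ring]
    rw [show (i : Int) = (i - 1) + 1 by ring, pvGetD_cons_succ a (b :: u) (i - 1) (by omega) (by omega)]
    rw [show i - 1 + 1 = i by ring, pvGetD_cons_succ a (b :: u) i (by omega) (by omega)]
  rw [hcong]
  by_cases hab : a < b
  · simp [hab]
  · simp [hab]

lemma pvDelList_empty_iff (p : List Int) : pvDelList p = [] ↔ pvNonInc p := by
  induction p with
  | nil => simp [pvDelList_nil, pvNonInc]
  | cons a q ih =>
    cases q with
    | nil => simp [pvDelList_single, pvNonInc]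
    | cons b u =>
      rw [pvDelList_cons]
      by_cases hab : a < b
      · simp only [if_pos hab, List.cons_append]
        constructor
        · intro h; exact absurd h (by simp)
        · intro h
          obtain ⟨h1, _⟩ := h
          omega
      · simp only [if_neg hab, List.nil_append, List.map_eq_nil_iff]
        rw [ih]
        show pvNonInc (b :: u) ↔ pvNonInc (a :: b :: u)
        exact ⟨fun h => ⟨by omega, h⟩, fun h => h.2⟩

lemma pvDelList_pairwise (p : List Int) : (pvDelList p).Pairwise (· < ·) := by
  unfold pvDelList
  rw [PySem.List.foldl_append_ite_eq_filter]
  simp only [List.nil_append]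
  exact (PySem.List.pairwise_lt_pyRange_one 1 p.length).filter _

lemma pvSorted_dl (p : List Int) :
    PySem.List.sorted (pvDelList p) (fun x => x) true = (pvDelList p).reverse := by
  refine PySem.List.sorted_rev_eq_of_perm_of_pairwise_gt _ _ _ (List.reverse_perm _) ?_
  rw [List.pairwise_reverse]
  exact pvDelList_pairwise p

lemma pvDelAt_zero_cons (b : Int) (l : List Int) : pvDelAt (b :: l) 0 = l := by
  simp [pvDelAt, PySem.List.pop?, PySem.List.pyIdx?]

lemma pvDelAt_cons_succ (a : Int) (l : List Int) (j : Int) (hj : 0 ≤ j) :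
    pvDelAt (a :: l) (j + 1) = a :: pvDelAt l j := by
  by_cases hj2 : j < l.length
  · have h1 : PySem.List.pop? l j = some (l[j.toNat], l.eraseIdx j.toNat) := by
      have h0 := PySem.List.pop?_natCast l j.toNat (by omega)
      rw [show ((j.toNat : Nat) : Int) = j by omega] at h0
      exact h0
    have h2 : PySem.List.pop? (a :: l) (j + 1)
        = some ((a :: l)[j.toNat + 1]'(by simp; omega), (a :: l).eraseIdx (j.toNat + 1)) := by
      have h0 := PySem.List.pop?_natCast (a :: l) (j.toNat + 1) (by simp; omega)
      rw [show ((j.toNat + 1 : Nat) : Int) = j + 1 by omega] at h0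
      exact h0
    simp [pvDelAt, h1, h2, List.eraseIdx_cons_succ]
  · have h1 : PySem.List.pop? l j = none := by
      simp only [PySem.List.pop?, PySem.List.pyIdx?]
      rw [if_pos hj, if_neg (by omega)]
      rfl
    have h2 : PySem.List.pop? (a :: l) (j + 1) = none := by
      simp only [PySem.List.pop?, PySem.List.pyIdx?, List.length_cons]
      rw [if_pos (by omega), if_neg (by push_cast; omega)]
      rfl
    simp [pvDelAt, h1, h2]

lemma pvEraseAll_shift (js : List Int) (q : List Int) (a : Int) (h : ∀ j ∈ js, 0 ≤ j) :
    (js.map (· + 1)).foldr (fun i l => pvDelAt l i) (a :: q)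
      = a :: js.foldr (fun i l => pvDelAt l i) q := by
  induction js with
  | nil => rfl
  | cons j js ih =>
    simp only [List.map_cons, List.foldr_cons]
    rw [ih (fun x hx => h x (by simp [hx]))]
    exact pvDelAt_cons_succ a _ j (h j (by simp))

lemma pvDelRound_foldr (p : List Int) :
    pvDelRound p = (pvDelList p).foldr (fun i l => pvDelAt l i) p := by
  unfold pvDelRound
  rw [pvSorted_dl, List.foldl_reverse]

lemma pvDelRound_eq (q : List Int) (a : Int) : pvDelRound (a :: q) = a :: pvSurv a q := by
  induction q generalizing a with
  | nil => rw [pvDelRound_foldr, pvDelList_single]; rfl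
  | cons b u ih =>
    rw [pvDelRound_foldr, pvDelList_cons, List.foldr_append]
    have hmem : ∀ j ∈ pvDelList (b :: u), (0 : Int) ≤ j := fun j hj => by
      have := pvDelList_mem_bounds _ j hj; omega
    rw [pvEraseAll_shift (pvDelList (b :: u)) (b :: u) a hmem]
    have hin : (pvDelList (b :: u)).foldr (fun i l => pvDelAt l i) (b :: u) = b :: pvSurv b u := by
      rw [← pvDelRound_foldr]; exact ih b
    rw [hin]
    by_cases hab : a < b
    · rw [if_pos hab]
      show pvDelAt (a :: b :: pvSurv b u) 1 = a :: pvSurv a (b :: u)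
      rw [show (1 : Int) = 0 + 1 by ring, pvDelAt_cons_succ a _ 0 (le_refl _), pvDelAt_zero_cons]
      simp [pvSurv, hab]
    · rw [if_neg hab]
      show a :: b :: pvSurv b u = a :: pvSurv a (b :: u)
      simp [pvSurv, hab]

lemma pvFold_run (xs : List Int) (S : List (Int × Int)) (b : Int) (hb : 0 ≤ b) :
    (xs.foldl pvStep (S, b)).2 = max b (pvRun S xs).2 := by
  induction xs generalizing S b with
  | nil => simp [pvRun]; omega
  | cons x xs ih =>
    have hd : 0 ≤ (if (pvPop x S).1.isEmpty then 0 else (pvPop x S).2 + 1) := by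
      have := pvPop_snd_nonneg x S
      split <;> omega
    simp only [List.foldl_cons, pvRun]
    show (xs.foldl pvStep (pvStep (S, b) x)).2 = _
    simp only [pvStep]
    rw [ih _ _ (by omega)]
    have ht := pvRun_snd_nonneg xs ((x, if (pvPop x S).1.isEmpty then 0 else (pvPop x S).2 + 1) :: (pvPop x S).1)
    simp only [max_def]
    split_ifs <;> omega

lemma pvAlt_core (p : List Int) : poisonousPlants_alt p = pvCore p := by
  cases p with
  | nil => rfl
  | cons a q =>
    show ((a :: q).foldl pvStep ([], 0)).2 = (pvRun [(a, 0)] q).2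
    have h1 : pvStep (([] : List (Int × Int)), 0) a = ([(a, 0)], 0) := by
      simp [pvStep, pvPop]
    rw [List.foldl_cons, h1, pvFold_run q [(a, 0)] 0 (le_refl _)]
    have := pvRun_snd_nonneg q [(a, 0)]
    omega

lemma pvCore_of_nonInc (p : List Int) (h : pvNonInc p) : pvCore p = 0 := by
  cases p with
  | nil => rfl
  | cons a q =>
    obtain ⟨w, hw⟩ := pvRun_nonInc q a h
    show (pvRun [(a, 0)] q).2 = 0
    rw [hw]

lemma pvAux_core (n : Nat) (p : List Int) (c : Int) (hn : p.length ≤ n) :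
    poisonousPlantsAux p c = c + pvCore p := by
  induction n generalizing p c with
  | zero =>
    have hp : p = [] := by
      cases p with
      | nil => rfl
      | cons a q => simp at hn
    subst hp
    rw [poisonousPlantsAux, dif_pos pvDelList_nil]
    show c = c + 0
    omega
  | succ n ih =>
    rw [poisonousPlantsAux]
    by_cases hdl : pvDelList p = []
    · rw [dif_pos hdl, pvCore_of_nonInc p ((pvDelList_empty_iff p).mp hdl)]
      omega
    · rw [dif_neg hdl]
      cases p with
      | nil => exact absurd pvDelList_nil hdl
      | cons a q =>
        have hlt := pvDelRound_length_lt (a :: q) hdl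
        have IH := ih (pvDelRound (a :: q)) (c + 1) (by omega)
        rw [IH, pvDelRound_eq]
        show (c + 1) + (pvRun [(a, 0)] (pvSurv a q)).2 = c + (pvRun [(a, 0)] q).2
        have hround := pvRun_round q a 0 [] rfl
        have hdec : pvDecF [((a : Int), (0 : Int))] = [(a, 0)] := by simp [pvDecF]
        rw [hdec] at hround
        have hpos : 1 ≤ (pvRun [(a, 0)] q).2 :=
          pvRun_pos q a 0 [] rfl (fun hni => hdl ((pvDelList_empty_iff _).mpr hni))
        have h2 : (pvRun [(a, 0)] (pvSurv a q)).2 = max ((pvRun [(a, 0)] q).2 - 1) 0 := by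
          rw [hround]
        rw [h2, max_eq_left (by omega)]
        omega

-- ===== VERDICT (by name: the statement is the Claim_ definition above) =====
theorem poisonousPlants_spec : Claim_equal_poisonousPlants := by
  intro p _
  unfold Spec_poisonousPlants
  rw [pvAlt_core]
  show poisonousPlantsAux p 0 = pvCore p
  have := pvAux_core p.length p 0 (le_refl _)
  omega
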